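/-
  NON-VACUITY AND INTERFACE CHECKS for Vorbis/Spec/Reader.lean (S-TEMPLATE, quality checks 2 and 3). Nothing here is used by a proof.

  1. THE COMMON PRECONDITION IS ESTABLISHABLE from a program point of the decoder invariant (`Real.FB`, `Real.SD`, `Real.InFrame`:
     `h.env.live`, `h.vorbis.bits`) + the shadow clause + the two `LiveIn` facts a caller carries in its own precondition.
  2. CALLER'S POSTCONDITION ⇒ CALLEE'S PRECONDITION for the call sites inside the group (get32 → get8 again, start_page_no_
     capturepattern → getn, getn → memcpy, every caller of `error`, start_page_no_capturepattern → stb_vorbis_get_file_offset,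
     start_page → start_page_no_capturepattern, get_bits stage 2 → stage 1 twice).
  3. THE μ CLAUSES COMPOSE: start_page from capture_pattern + start_page_no_capturepattern (D-11), maybe_start_packet from four
     get8 + start_page_no_capturepattern, get8_packet_raw's strict decrease from next_segment's post, flush_packet's loop on μ,
     get_bits' stage 2 from two stage-1 posts.
-/
import Vorbis.Spec.Reader
namespace Vorbis.Spec.ReaderTest
open X86 X86.User Asan Vorbis Vorbis.Spec

variable {others : List Obj} {frames : List (Nat × FrameLayout)} {Blk : Block → Prop} {len : Nat}

/-! ### 1. The precondition from the program points -/

/-- At a frame boundary (`Real.FB`, the decoder's steady state): the reader's precondition from the point, the shadow clause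
and the two one-object facts. -/
example (A : Arena × List Obj) (u : State) (stored room : Int)
    (h : Real.FB len A Blk (Live (stackObjs frames ++ others)) u.mem (u.reg .rdi).toNat stored room)
    (hsh : ShadowPre others frames u) (hobj : LiveIn others frames (u.reg .rdi).toNat Off.sizeof.stb_vorbis)
    (hinp : 0 < len → LiveIn others frames IN len) : ReaderPre others frames Blk len u :=
  ⟨hsh, ⟨h.env.live, hobj, hinp⟩, h.vorbis.bits⟩

/-- The same from the hand-over carrier (`Hand`, Vorbis/Spec/Common.lean: what start_decoder carries as `StartDecoder.HandOK` and
decode time as `DecodeInv.hand`): `ReaderEnv` is `Hand.readerEnv` applied to the point's `env.live`. -/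
example (A : Arena × List Obj) (u : State) (stored room : Int)
    (h : Real.FB len A Blk (Live (stackObjs frames ++ others)) u.mem (u.reg .rdi).toNat stored room)
    (hsh : ShadowPre others frames u) (hh : Hand others frames len A.1 (u.reg .rdi).toNat) :
    ReaderPre others frames Blk len u :=
  ⟨hsh, hh.readerEnv h.env.live, h.vorbis.bits⟩

/-- Inside start_decoder (`Real.SD k`, the object is `&p` on the stack): `Bits` is a field of the point from SD.1 on; here it is
given apart, so that the example does not depend on the guard. -/
example (A : Arena × List Obj) (u : State) (k R : Nat)
    (h : Real.SD len k A Blk (Live (stackObjs frames ++ others)) u.mem (u.reg .rdi).toNat R)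
    (hb : Bits Blk len u.mem (u.reg .rdi).toNat)
    (hsh : ShadowPre others frames u) (hobj : LiveIn others frames (u.reg .rdi).toNat Off.sizeof.stb_vorbis)
    (hinp : 0 < len → LiveIn others frames IN len) : ReaderPre others frames Blk len u :=
  ⟨hsh, ⟨h.env.live, hobj, hinp⟩, hb⟩

/-- `*f` as an object of `others` (the arena copy) gives the `obj` clause. -/
example (f : Nat) (o : Obj) (ho : o ∈ others) (hb : o.base = f) (hs : o.size = Off.sizeof.stb_vorbis) :
    LiveIn others frames f Off.sizeof.stb_vorbis := by
  refine ⟨o, List.mem_append_right _ ho, ?_, ?_⟩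
  · omega
  · omega

/-! ### 2. Caller's post ⇒ callee's pre -/

/-- get32 / capture_pattern / maybe_start_packet: get8 again on the state a get8 returned (`s` = the caller's state at the next
`call`: same memory as the returned state, `rdi = f` again). -/
example (u v s : State) (h : ReaderPre others frames Blk len u) (hp : Get8Post Blk len (u.reg .rdi).toNat u v)
    (hsh : ShadowPre others frames s) (hrdi : s.reg .rdi = u.reg .rdi) (hmem : s.mem = v.mem) :
    (get8.spec others frames Blk len).pre s := by
  apply h.again hsh hrdi
  rw [hmem]
  exact hp.reader.bits

/-- Every caller of `error(f, e)`: its precondition is the shadow clause and the `obj` clause. -/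
example (u s : State) (h : ReaderPre others frames Blk len u) (hsh : ShadowPre others frames s)
    (hrdi : s.reg .rdi = u.reg .rdi) : (error.spec others frames).pre s := by
  refine ⟨hsh, ?_⟩
  rw [hrdi]
  exact h.env.obj

/-- start_page_no_capturepattern → stb_vorbis_get_file_offset (S1's Spec: the shadow clause and bytewise OB1). -/
example (u s : State) (h : ReaderPre others frames Blk len u) (hsh : ShadowPre others frames s)
    (hrdi : s.reg .rdi = u.reg .rdi) : (stb_vorbis_get_file_offset.spec others frames).pre s := by
  refine ⟨hsh, ?_⟩
  rw [hrdi]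
  exact h.objLive

/-- start_page_no_capturepattern → `getn(f, f->segments, segment_count)`: `rsi = f + 0x5d4`, `edx` = a byte. -/
example (u s : State) (b : Nat) (hb : b ≤ 255) (h : ReaderPre others frames Blk len u)
    (hs : ReaderPre others frames Blk len s) (hrdi : s.reg .rdi = u.reg .rdi)
    (hrsi : (s.reg .rsi).toNat = (u.reg .rdi).toNat + 1492) (hrdx : argInt (s.reg .rdx) = (b : Int)) :
    (getn.spec others frames Blk len).pre s := by
  have hobj := h.env.obj
  have hr := hs.bits.OBR
  have hS1 := hs.bits.S1
  simp only [voff] at hr hS1 hobj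
  have hn : (argInt (s.reg .rdx)).toNat = b := by
    rw [hrdx]
    omega
  refine ⟨hs, ?_, ?_, ?_⟩
  · rw [hrdx]
    omega
  · rw [hn, hrsi]
    by_cases hb0 : b = 0
    · exact Or.inl hb0
    · right
      exact hobj.sub _ _ (by omega) (by omega)
  · rw [hn, hrsi, hrdi]
    constructor
    · simp only [voff]
      rw [hrdi] at hr
      omega
    · right
      right
      omega

/-- getn → memcpy on the arm where the bytes fit: the source is inside the input (ONE object: `env.inp`), the destination is the
caller's, and the two do not overlap in the harmful direction. `s` = getn's state at `call memcpy`. -/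
example (u s : State) (h : GetnPre others frames Blk len u) (hsh : ShadowPre others frames s)
    (hfits : argInt (u.reg .rdx) ≤ (stb_vorbis.stream_end u.mem (u.reg .rdi).toNat : Int) -
      (stb_vorbis.stream u.mem (u.reg .rdi).toNat : Int))
    (hrdi : (s.reg .rdi).toNat = (u.reg .rsi).toNat)
    (hrsi : (s.reg .rsi).toNat = stb_vorbis.stream u.mem (u.reg .rdi).toNat)
    (hrdx : (s.reg .rdx).toNat = (argInt (u.reg .rdx)).toNat) : (memcpy.spec others frames).pre s := by
  refine ⟨hsh, ?_⟩
  by_cases h0 : (argInt (u.reg .rdx)).toNat = 0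
  · left
    rw [hrdx]
    exact h0
  · right
    have hnn := h.nonneg
    have hp := h.reader.bits.ptr_range
    have hS1 := h.reader.bits.S1
    simp only [voff] at hS1
    have hfit := getn_fits _ _ _ hnn hfits
    have hlen : 0 < len := by omega
    have hin := h.reader.env.inp hlen
    have hap := h.apart.offInput
    simp only [voff] at hap hin
    rw [hrdx, hrsi, hrdi]
    refine ⟨?_, ?_, ?_⟩
    · exact hin.sub _ _ (by omega) (by omega)
    · exact h.dest.resolve_left h0
    · omega

/-- start_page → start_page_no_capturepattern after a successful capture_pattern: `next_seg` was not written (it is not in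
capture_pattern's footprint: the caller reads it back through `Returned.same`; here as a hypothesis). -/
example (u v s : State) (h : ReaderPre others frames Blk len u) (hb : AtPageBoundary u.mem (u.reg .rdi).toNat)
    (hp : CapturePost Blk len (u.reg .rdi).toNat u v) (hsh : ShadowPre others frames s) (hrdi : s.reg .rdi = u.reg .rdi)
    (hmem : s.mem = v.mem)
    (hns : stb_vorbis.next_seg v.mem (u.reg .rdi).toNat = stb_vorbis.next_seg u.mem (u.reg .rdi).toNat) :
    (start_page_no_capturepattern.spec others frames Blk len).pre s := by
  refine ⟨?_, ?_⟩
  · apply h.again hsh hrdi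
    rw [hmem]
    exact hp.reader.bits
  · unfold AtPageBoundary at hb ⊢
    rw [hrdi, hmem, hns]
    exact hb

/-- get_bits stage 2 → stage 1, first call (`esi = 24`). -/
example (u s : State) (h : ReaderPre others frames Blk len u) (hsh : ShadowPre others frames s)
    (hrdi : s.reg .rdi = u.reg .rdi) (hb : Bits Blk len s.mem (u.reg .rdi).toNat) (hrsi : s.reg .rsi = 24) :
    (get_bits.spec24 others frames Blk len).pre s := by
  refine ⟨h.again hsh hrdi hb, ?_⟩
  unfold bitsArg
  rw [hrsi]
  decide

/-! ### 3. The μ clauses compose -/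

/-- **start_page** (D-11): capture_pattern returned 1 (four real bytes), then start_page_no_capturepattern — success or failure:
μ is strictly smaller. -/
example (f : Nat) (u v w : State) (hc : CapturePost Blk len f u v) (h1 : v.reg .rax = 1)
    (hp : PageNoCapturePost Blk len f v w) : mu w.mem f < mu u.mem f := by
  have hm := (hc.matched h1).2
  have hb := hp.bound
  omega

/-- **maybe_start_packet**: four get8 that returned non-zero bytes, then start_page_no_capturepattern. The entry state `a (k+1)` of
a call is not the state `b k` the previous call returned (the push of the return address lies between): μ is the same there
(`Reader.store_off_obj`), which is all the composition needs. -/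
example (f : Nat) (a1 b1 a2 b2 a3 b3 a4 b4 a5 w : State) (g1 : Get8Post Blk len f a1 b1) (g2 : Get8Post Blk len f a2 b2)
    (g3 : Get8Post Blk len f a3 b3) (g4 : Get8Post Blk len f a4 b4) (n1 : b1.reg .rax ≠ 0) (n2 : b2.reg .rax ≠ 0)
    (n3 : b3.reg .rax ≠ 0) (n4 : b4.reg .rax ≠ 0) (e2 : mu a2.mem f = mu b1.mem f) (e3 : mu a3.mem f = mu b2.mem f)
    (e4 : mu a4.mem f = mu b3.mem f) (e5 : mu a5.mem f = mu b4.mem f) (hp : PageNoCapturePost Blk len f a5 w) :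
    mu w.mem f < mu a1.mem f := by
  have c1 := (g1.adv n1).2
  have c2 := (g2.adv n2).2
  have c3 := (g3.adv n3).2
  have c4 := (g4.adv n4).2
  have hb := hp.bound
  omega

/-- **get8_packet_raw**: next_segment returned a non-zero length (`bytes_in_seg` = that length ≥ 1, μ already strictly smaller);
the decrement of `bytes_in_seg` and get8 do not increase it again. In `muOf` form: Lemma μ, case a. -/
example (e s s' : Nat) (sc ns : Int) (b : Nat) (hb : 1 ≤ b) (hs : s ≤ s') : muOf e s' sc ns (b - 1) < muOf e s sc ns b :=
  muOf_dec_byte e s s' sc ns b hb hs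

/-- **flush_packet / the skip loop of start_decoder**: a loop whose every round lowers μ strictly terminates (`mu_wf`). -/
example (f : Nat) (P : Mem → Prop) (step : ∀ mem, (∀ mem', mu mem' f < mu mem f → P mem') → P mem) (mem : Mem) : P mem :=
  (mu_wf f).induction mem step

/-- **get_bits stage 2**: the posts of the two stage-1 calls (arguments 24 and `n − 24`) give the post for `n`, with the result
as the machine forms it (`shl eax, 0x18 ; add eax, ebp`). -/
example (f n : Nat) (u v w : State) (hn : 25 ≤ n) (hvb : 0 ≤ stb_vorbis.valid_bits u.mem f)
    (h1 : GetBitsSpecPost Blk len f 24 u v) (h2 : GetBitsSpecPost Blk len f (n - 24) v w) :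
    GetBitsPost Blk len u.mem w.mem f n
      (((w.reg .rax).toNat * 2 ^ 24 % 2 ^ 32 + (v.reg .rax).toNat) % 2 ^ 32) := by
  rw [get_bits_combine_machine]
  exact GetBitsPost.combine h1.bits h2.bits hn hvb

/-- The index bound a caller reads off get_bits' post: `get_bits(f, 6) < 64`. -/
example (f : Nat) (u v : State) (h : GetBitsSpecPost Blk len f 6 u v) : (v.reg .rax).toNat < 64 :=
  h.bits.result.2 (by decide)

/-- A decode-time caller's `StoreOK` for a window of get_bits' footprint. -/
example (mem : Mem) (f : Nat) (s : Span) (h : s ∈ Reader.winsBits f) : StoreOK Blk mem f s :=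
  Reader.storeOK_of_mem Blk mem f s (Or.inr (Or.inr (Or.inr (Or.inr (Or.inr (Or.inl h))))))

end Vorbis.Spec.ReaderTest
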